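-- pv_equiv track=rewrite | github.com/NP-LI/GetArticle | guofangkeji.py | delete_CRLF
-- ===== SOURCE A (Python) =====
-- def delete_CRLF(string):
--     string = string.split('\n')
--     text = ''
--     for s in string:
--         text += s
--     string = text
--
--     string = string.split('\r')
--     text = ''
--     for s in string:
--         text += s
--     return text
-- ===== SOURCE B (Python) =====
-- def delete_CRLF(string):
--     return ''.join(c for c in string if c not in '\r\n')
-- ===== Notes on version B (the rewrite author's own statement) =====
-- stated objective: simpler
-- what changed: Replaces A's two split-then-reconcatenate passes (building lists via split and re-joining them with repeated += ) by one character-level filtering pass that keeps every character other than '\r' and '\n'.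
import Mathlib
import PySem

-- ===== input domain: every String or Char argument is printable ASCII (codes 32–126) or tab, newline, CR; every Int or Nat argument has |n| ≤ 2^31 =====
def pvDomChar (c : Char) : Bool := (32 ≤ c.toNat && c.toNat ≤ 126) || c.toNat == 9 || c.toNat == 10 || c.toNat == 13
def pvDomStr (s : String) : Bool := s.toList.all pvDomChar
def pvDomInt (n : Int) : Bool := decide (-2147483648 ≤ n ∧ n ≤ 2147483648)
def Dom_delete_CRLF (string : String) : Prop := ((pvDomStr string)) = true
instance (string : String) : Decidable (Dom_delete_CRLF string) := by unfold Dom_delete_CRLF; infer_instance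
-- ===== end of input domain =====

-- B replaces A's two split-and-reconcatenate passes with a single character-level filter pass (simpler decomposition).


-- ===== PORT A =====
-- A: split on '\n', re-concatenate with a += loop, then split on '\r' and re-concatenate again.
def delete_CRLF (string : String) : String :=
  let parts1 := PySem.Chars.splitOn string.toList ['\n']
  let text1 := parts1.foldl (fun acc s => acc ++ s) []
  let parts2 := PySem.Chars.splitOn text1 ['\r']
  let text2 := parts2.foldl (fun acc s => acc ++ s) []
  String.ofList text2

-- ===== PORT B =====
-- B: one pass, keeping each character that is not '\r' or '\n' (''.join(c for c in string if c not in '\r\n')).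
def delete_CRLF_alt (string : String) : String :=
  String.ofList (string.toList.filter (fun c => !(c == '\r' || c == '\n')))

-- ===== PRECONDITION & SPEC =====
def Spec_delete_CRLF (string : String) (out : String) : Prop := out = delete_CRLF_alt string
instance (string : String) (out : String) : Decidable (Spec_delete_CRLF string out) := by unfold Spec_delete_CRLF; infer_instance

-- ===== CLAIM (what is proved, stated in full; the proofs are below) =====
def Claim_equal_delete_CRLF : Prop := ∀ (string : String), Dom_delete_CRLF string → Spec_delete_CRLF string (delete_CRLF string)

-- ===== LEMMAS AND PROOFS =====

-- flattening the pieces of a single-character split recovers the string with that character filtered out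
theorem splitOn_go_flatten (c : Char) (fuel : Nat) (l cur : List Char) (acc : List (List Char))
    (h : l.length < fuel) :
    (PySem.Chars.splitOn.go [c] fuel l cur acc).flatten
      = acc.reverse.flatten ++ cur.reverse ++ l.filter (· ≠ c) := by
  induction fuel generalizing l cur acc with
  | zero => omega
  | succ fuel ih =>
    cases l with
    | nil => simp [PySem.Chars.splitOn.go]
    | cons ch rest =>
      simp only [PySem.Chars.splitOn.go, List.isPrefixOf, Bool.and_true]
      by_cases hc : ch = c
      · subst hc
        simp only [BEq.rfl, if_pos]
        rw [ih _ _ _ (by simpa using Nat.lt_of_succ_lt_succ h)]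
        simp
      · rw [if_neg (by simp [BEq.comm (a := c)]; exact fun h' => hc h')]
        rw [ih _ _ _ (by simpa using Nat.lt_of_succ_lt_succ h)]
        simp [hc]

theorem splitOn_flatten (c : Char) (s : List Char) :
    (PySem.Chars.splitOn s [c]).flatten = s.filter (· ≠ c) := by
  unfold PySem.Chars.splitOn
  rw [splitOn_go_flatten c (s.length + 1) s [] [] (by omega)]
  simp

-- ===== VERDICT (by name: the statement is the Claim_ definition above) =====
theorem delete_CRLF_spec : Claim_equal_delete_CRLF := by
  intro s _
  show _ = _
  unfold delete_CRLF delete_CRLF_alt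
  simp only [PySem.List.foldl_append_eq_flatten, List.nil_append,
    splitOn_flatten, List.filter_filter]
  congr 1
  apply List.filter_congr
  intro c _
  by_cases h1 : c = '\r' <;> by_cases h2 : c = '\n' <;> simp [h1, h2]
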